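-- pv_equiv track=rewrite | github.com/TeeKay-FourTwentyOne/math | ramsey-book-graphs/algebraic_invariants.py | necklace_gaps_and_runs
-- ===== SOURCE A (Python) =====
-- from itertools import groupby
--
-- def necklace_gaps_and_runs(bits):
--     """Compute gap sizes (runs of 0s) and run sizes (runs of 1s), both sorted descending."""
--     groups = [(k, len(list(g))) for k, g in groupby(bits)]
--
--     # Handle wrap-around for circular string
--     if len(groups) > 1 and groups[0][0] == groups[-1][0]:
--         merged_len = groups[0][1] + groups[-1][1]
--         merged_key = groups[0][0]
--         groups = [(merged_key, merged_len)] + groups[1:-1]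
--
--     gaps = sorted([l for k, l in groups if k == '0'], reverse=True)
--     runs = sorted([l for k, l in groups if k == '1'], reverse=True)
--     return gaps, runs
-- ===== SOURCE B (Python) =====
-- def necklace_gaps_and_runs(bits):
--     """Rotate the necklace to a run boundary, then one forward scan classifies
--     run lengths directly -- no group list, no wrap-around merge step."""
--     bits = list(bits)
--     n = len(bits)
--     if n == 0:
--         return [], []
--     gaps, runs = [], []
--
--     def add(ch, length):
--         if ch == '0':
--             gaps.append(length)
--         elif ch == '1':
--             runs.append(length)
--
--     first = bits[0]
--     cut = 0
--     while cut < n and bits[cut] == first: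
--         cut += 1
--     if cut == n:
--         add(first, n)
--     else:
--         rotated = bits[cut:] + bits[:cut]
--         cur = rotated[0]
--         count = 1
--         for ch in rotated[1:]:
--             if ch == cur:
--                 count += 1
--             else:
--                 add(cur, count)
--                 cur, count = ch, 1
--         add(cur, count)
--     gaps.sort(reverse=True)
--     runs.sort(reverse=True)
--     return gaps, runs
-- ===== Notes on version B (the rewrite author's own statement) =====
-- stated objective: alternative
-- what changed: Instead of building a groupby list and patching it with an explicit wrap-around merge of the first and last groups, B rotates the list to the first run boundary (so the circular seam disappears) and classifies run lengths into gaps/runs in a single forward scan with a (cur, count) accumulator.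
import Mathlib
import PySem

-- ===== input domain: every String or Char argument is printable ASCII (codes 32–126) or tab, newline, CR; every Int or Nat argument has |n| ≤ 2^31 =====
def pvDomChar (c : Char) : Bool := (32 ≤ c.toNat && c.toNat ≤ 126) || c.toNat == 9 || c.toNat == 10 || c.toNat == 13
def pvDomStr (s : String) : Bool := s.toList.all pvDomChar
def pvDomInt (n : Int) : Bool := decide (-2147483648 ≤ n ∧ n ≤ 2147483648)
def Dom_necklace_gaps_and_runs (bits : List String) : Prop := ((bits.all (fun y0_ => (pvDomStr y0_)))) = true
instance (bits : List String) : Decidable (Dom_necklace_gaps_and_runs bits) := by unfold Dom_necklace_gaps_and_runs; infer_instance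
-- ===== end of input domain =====

-- B replaces groupby + an explicit wrap-around merge by rotating the necklace to a run
-- boundary and classifying run lengths in one forward scan (objective: alternative decomposition).

-- ===== PORT A =====
-- itertools.groupby over a list, as (key, run length) pairs; structural recursion that
-- prepends each element onto the grouping of the tail (same list as Python's groupby).
def pvConsMerge (x : String) (l : List (String × Int)) : List (String × Int) :=
  match l with
  | [] => [(x, 1)]
  | (k, c) :: t => if x = k then (x, c + 1) :: t else (x, 1) :: (k, c) :: t

def pvGroupby : List String → List (String × Int)
  | [] => []
  | x :: xs => pvConsMerge x (pvGroupby xs)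

-- the wrap-around block: len(groups) > 1 and groups[0][0] == groups[-1][0] → merge first and last
def pvWrapMerge (groups : List (String × Int)) : List (String × Int) :=
  match groups with
  | g0 :: g1 :: rest =>
    let lastg := (g1 :: rest).getLast (by simp)
    if g0.1 = lastg.1 then (g0.1, g0.2 + lastg.2) :: (g1 :: rest).dropLast
    else g0 :: g1 :: rest
  | l => l

def necklace_gaps_and_runs (bits : List String) : List Int × List Int :=
  let groups := pvWrapMerge (pvGroupby bits)
  (PySem.List.sorted ((groups.filter (fun p => p.1 == "0")).map (·.2)) (fun x => x) true,
   PySem.List.sorted ((groups.filter (fun p => p.1 == "1")).map (·.2)) (fun x => x) true)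

-- ===== PORT B =====
-- the nested 'add' helper of Source B
def pvAdd (ch : String) (len : Int) (gr : List Int × List Int) : List Int × List Int :=
  if ch = "0" then (gr.1 ++ [len], gr.2)
  else if ch = "1" then (gr.1, gr.2 ++ [len])
  else gr

-- the 'for ch in rotated[1:]' loop of Source B with its (cur, count, gaps, runs) state
def pvScan (cur : String) (count : Int) (gr : List Int × List Int) : List String → List Int × List Int
  | [] => pvAdd cur count gr
  | ch :: rest =>
    if ch = cur then pvScan cur (count + 1) gr rest
    else pvScan ch 1 (pvAdd cur count gr) rest

def necklace_gaps_and_runs_alt (bits : List String) : List Int × List Int :=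
  match bits with
  | [] => ([], [])
  | first :: _ =>
    let n := bits.length
    -- while cut < n and bits[cut] == first: cut += 1
    let cut := (bits.takeWhile (fun b => b == first)).length
    let gr :=
      if cut = n then pvAdd first (n : Int) ([], [])
      else
        -- bits[cut:] + bits[:cut]; 0 ≤ cut ≤ n, so drop/take are exact for these slices
        match bits.drop cut ++ bits.take cut with
        | [] => ([], [])   -- unreachable: bits ≠ []
        | c :: rest => pvScan c 1 ([], []) rest
    (PySem.List.sorted gr.1 (fun x => x) true, PySem.List.sorted gr.2 (fun x => x) true)

-- ===== PRECONDITION & SPEC =====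
def Spec_necklace_gaps_and_runs (bits : List String) (out : List Int × List Int) : Prop := out = necklace_gaps_and_runs_alt bits
instance (bits : List String) (out : List Int × List Int) : Decidable (Spec_necklace_gaps_and_runs bits out) := by unfold Spec_necklace_gaps_and_runs; infer_instance

-- ===== CLAIM (what is proved, stated in full; the proofs are below) =====
def Claim_equal_necklace_gaps_and_runs : Prop := ∀ (bits : List String), Dom_necklace_gaps_and_runs bits → Spec_necklace_gaps_and_runs bits (necklace_gaps_and_runs bits)

-- ===== LEMMAS AND PROOFS =====

-- select the run lengths of one key, in order
def pvSel (k : String) (L : List (String × Int)) : List Int :=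
  (L.filter (fun p => p.1 == k)).map (·.2)

-- folding pvAdd over a group list appends exactly the "0"- and "1"-selected lengths
theorem pvAdd_foldl (L : List (String × Int)) : ∀ gr : List Int × List Int,
    L.foldl (fun g p => pvAdd p.1 p.2 g) gr = (gr.1 ++ pvSel "0" L, gr.2 ++ pvSel "1" L) := by
  induction L with
  | nil => intro gr; simp [pvSel]
  | cons p L ih =>
    intro gr
    obtain ⟨k, c⟩ := p
    simp only [List.foldl_cons, ih]
    by_cases h0 : k = "0" <;> by_cases h1 : k = "1" <;>
      simp_all [pvAdd, pvSel]

-- bump the head count of a group list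
def pvHeadAdd (d : Int) : List (String × Int) → List (String × Int)
  | [] => []
  | (k, c) :: t => (k, c + d) :: t

theorem pvGroupby_cons_head (x : String) (xs : List String) :
    ∃ c t, pvGroupby (x :: xs) = (x, c) :: t := by
  show ∃ c t, pvConsMerge x (pvGroupby xs) = (x, c) :: t
  cases hg : pvGroupby xs with
  | nil => exact ⟨1, [], rfl⟩
  | cons p t =>
    obtain ⟨k, c⟩ := p
    by_cases h : x = k
    · exact ⟨c + 1, t, by simp [pvConsMerge, h]⟩
    · exact ⟨1, (k, c) :: t, by simp [pvConsMerge, h]⟩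

-- the scan of Source B is the pvAdd-fold over the linear grouping (head count offset by count-1)
theorem pvScan_eq (rest : List String) : ∀ (c : String) (k : Int) (gr : List Int × List Int),
    pvScan c k gr rest
      = (pvHeadAdd (k - 1) (pvGroupby (c :: rest))).foldl (fun g p => pvAdd p.1 p.2 g) gr := by
  induction rest with
  | nil =>
    intro c k gr
    simp [pvScan, pvGroupby, pvConsMerge, pvHeadAdd]
  | cons ch t ih =>
    intro c k gr
    by_cases h : ch = c
    · subst h
      rw [show pvScan ch k gr (ch :: t) = pvScan ch (k + 1) gr t from by simp [pvScan], ih]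
      obtain ⟨c0, t0, hg⟩ := pvGroupby_cons_head ch t
      have hg2 : pvGroupby (ch :: ch :: t) = (ch, c0 + 1) :: t0 := by
        show pvConsMerge ch (pvGroupby (ch :: t)) = _
        rw [hg]; simp [pvConsMerge]
      rw [hg, hg2]
      simp [pvHeadAdd]
    · rw [show pvScan c k gr (ch :: t) = pvScan ch 1 (pvAdd c k gr) t from by simp [pvScan, h], ih]
      obtain ⟨c0, t0, hg⟩ := pvGroupby_cons_head ch t
      have hg2 : pvGroupby (c :: ch :: t) = (c, 1) :: (ch, c0) :: t0 := by
        show pvConsMerge c (pvGroupby (ch :: t)) = _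
        rw [hg]
        simp only [pvConsMerge]
        rw [if_neg (fun hh => h hh.symm)]
      rw [hg, hg2]
      simp [pvHeadAdd]

-- concatenation of two group lists, merging at the seam
def pvCatMerge (p : String × Int) (b : List (String × Int)) : List (String × Int) :=
  match b with
  | [] => [p]
  | (k', c') :: t => if p.1 = k' then (p.1, p.2 + c') :: t else p :: b

def pvMergeList : List (String × Int) → List (String × Int) → List (String × Int)
  | [], b => b
  | [p], b => pvCatMerge p b
  | p :: q :: t, b => p :: pvMergeList (q :: t) b

theorem pvMergeList_cons_head (k : String) (c0 : Int) (rest b : List (String × Int)) :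
    ∃ c' t', pvMergeList ((k, c0) :: rest) b = (k, c') :: t' := by
  cases rest with
  | nil =>
    cases b with
    | nil => exact ⟨c0, [], rfl⟩
    | cons q t =>
      obtain ⟨k', c'⟩ := q
      by_cases h : k = k'
      · exact ⟨c0 + c', t, by simp [pvMergeList, pvCatMerge, h]⟩
      · exact ⟨c0, (k', c') :: t, by simp [pvMergeList, pvCatMerge, h]⟩
  | cons q t => exact ⟨c0, pvMergeList (q :: t) b, rfl⟩

theorem pvConsMerge_mergeList (a : List (String × Int)) : ∀ (b : List (String × Int)) (x : String),
    pvConsMerge x (pvMergeList a b) = pvMergeList (pvConsMerge x a) b := by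
  induction a with
  | nil =>
    intro b x
    cases b with
    | nil => rfl
    | cons q t =>
      obtain ⟨k', c'⟩ := q
      by_cases h : x = k' <;>
        simp [pvMergeList, pvConsMerge, pvCatMerge, h, add_comm]
  | cons p a iha =>
    intro b x
    obtain ⟨k, c⟩ := p
    cases a with
    | nil =>
      by_cases h : x = k
      · subst h
        cases b with
        | nil => simp [pvMergeList, pvCatMerge, pvConsMerge]
        | cons q t =>
          obtain ⟨k', c'⟩ := q
          by_cases h2 : x = k'
          · simp [pvMergeList, pvCatMerge, pvConsMerge, h2]
            ring_nf
          · simp [pvMergeList, pvCatMerge, pvConsMerge, h2]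
      · cases b with
        | nil => simp [pvMergeList, pvCatMerge, pvConsMerge, h]
        | cons q t =>
          obtain ⟨k', c'⟩ := q
          by_cases h2 : k = k'
          · subst h2
            simp [pvMergeList, pvCatMerge, pvConsMerge, h]
          · simp [pvMergeList, pvCatMerge, pvConsMerge, h, h2]
    | cons q a' =>
      obtain ⟨kq, cq⟩ := q
      obtain ⟨cm, tm, hm⟩ := pvMergeList_cons_head kq cq a' b
      by_cases h : x = k
      · simp [pvMergeList, pvConsMerge, h, hm]
      · simp [pvMergeList, pvConsMerge, h, hm]

theorem pvGroupby_append (xs ys : List String) :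
    pvGroupby (xs ++ ys) = pvMergeList (pvGroupby xs) (pvGroupby ys) := by
  induction xs with
  | nil => simp [pvGroupby, pvMergeList]
  | cons x xs ih =>
    show pvConsMerge x (pvGroupby (xs ++ ys)) = pvMergeList (pvConsMerge x (pvGroupby xs)) (pvGroupby ys)
    rw [ih, pvConsMerge_mergeList]

theorem pvGroupby_replicate (h : String) : ∀ m : Nat, 1 ≤ m →
    pvGroupby (List.replicate m h) = [(h, (m : Int))] := by
  intro m
  induction m with
  | zero => omega
  | succ m ih =>
    intro _
    by_cases hm : 1 ≤ m
    · rw [List.replicate_succ]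
      show pvConsMerge h (pvGroupby (List.replicate m h)) = _
      rw [ih hm]
      simp [pvConsMerge]
    · have : m = 0 := by omega
      subst this
      simp [pvGroupby, pvConsMerge]

theorem pvMergeList_single_right (a : List (String × Int)) (p : String × Int) (ha : a ≠ []) :
    pvMergeList a [p] = a.dropLast ++ pvCatMerge (a.getLast ha) [p] := by
  induction a with
  | nil => exact absurd rfl ha
  | cons q a ih =>
    cases a with
    | nil => simp [pvMergeList]
    | cons r a' =>
      have h2 : pvMergeList (q :: r :: a') [p] = q :: pvMergeList (r :: a') [p] := rfl
      rw [h2, ih (by simp)]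
      simp [List.getLast_cons]

-- sorted(· , reverse=True) of Int lists only depends on the multiset
theorem pvSorted_rev_of_perm (xs ys : List Int) (hp : xs.Perm ys) :
    PySem.List.sorted xs (fun x => x) true = PySem.List.sorted ys (fun x => x) true := by
  exact List.Perm.eq_of_pairwise
    (fun a b _ _ h1 h2 => le_antisymm h2 h1)
    (PySem.List.sorted_pairwise_rev xs (fun x => x))
    (PySem.List.sorted_pairwise_rev ys (fun x => x))
    (((PySem.List.sorted_perm xs _ true).trans hp).trans (PySem.List.sorted_perm ys _ true).symm)

-- the wrap-merged group list of A is a permutation of the linear grouping of B's rotation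
theorem pvMain_perm (bits : List String) (first : String) (rest0 : List String)
    (hb : bits = first :: rest0)
    (hcut : (bits.takeWhile (fun b => b == first)).length ≠ bits.length) :
    (pvWrapMerge (pvGroupby bits)).Perm
      (pvGroupby (bits.drop (bits.takeWhile (fun b => b == first)).length
                  ++ bits.take (bits.takeWhile (fun b => b == first)).length)) := by
  set p : String → Bool := fun b => b == first with hp
  set P := bits.takeWhile p with hP
  set S := bits.dropWhile p with hS
  have hPS : P ++ S = bits := List.takeWhile_append_dropWhile
  have htake : bits.take P.length = P := by
    conv_lhs => rw [← hPS]
    exact List.take_left' rfl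
  have hdrop : bits.drop P.length = S := by
    conv_lhs => rw [← hPS]
    exact List.drop_left' rfl
  have hScons : S ≠ [] := by
    intro hnil
    apply hcut
    have : P = bits := by rw [← hPS, hnil, List.append_nil]
    rw [this]
  have hPrep : P = List.replicate P.length first := by
    rw [List.eq_replicate_iff]
    refine ⟨rfl, fun b hb => ?_⟩
    have := List.mem_takeWhile_imp hb
    simpa [hp] using this
  have hPlen : 1 ≤ P.length := by
    have : first ∈ P := by
      rw [hP, hb]
      simp [List.takeWhile, hp]
    calc 1 ≤ 1 := le_refl 1
    _ ≤ P.length := List.length_pos_of_mem this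
  have hGP : pvGroupby P = [(first, (P.length : Int))] := by
    conv_lhs => rw [hPrep]
    exact pvGroupby_replicate first P.length hPlen
  obtain ⟨s0, S', hS'⟩ : ∃ s0 S', S = s0 :: S' := by
    cases hc : S with
    | nil => exact absurd hc hScons
    | cons a l => exact ⟨a, l, rfl⟩
  have hSd : List.dropWhile p bits = s0 :: S' := by rw [← hS, hS']
  have hs0 : s0 ≠ first := by
    have w : List.dropWhile p bits ≠ [] := by rw [hSd]; simp
    have h1 := List.head_dropWhile_not p (l := bits) w
    rw [show (List.dropWhile p bits).head w = s0 from by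
 revert w; rw [hSd]; intro w _; rfl] at h1
    simpa [hp] using h1
  obtain ⟨c0, T, hGS⟩ := pvGroupby_cons_head s0 S'
  rw [← hS'] at hGS
  -- A's (unmerged) group list
  have hGa : pvGroupby bits = (first, (P.length : Int)) :: (s0, c0) :: T := by
    rw [← hPS, pvGroupby_append, hGP, hGS]
    simp [pvMergeList, pvCatMerge, Ne.symm hs0]
  -- B's rotated group list
  have hGb : pvGroupby (bits.drop P.length ++ bits.take P.length)
      = ((s0, c0) :: T).dropLast ++ pvCatMerge (((s0, c0) :: T).getLast (by simp)) [(first, (P.length : Int))] := by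
    rw [hdrop, htake, pvGroupby_append, hGP, hGS]
    exact pvMergeList_single_right _ _ (by simp)
  rw [hGa, hGb]
  show (if first = (((s0, c0) :: T).getLast (by simp)).1
        then (first, (P.length : Int) + (((s0, c0) :: T).getLast (by simp)).2) :: ((s0, c0) :: T).dropLast
        else (first, (P.length : Int)) :: (s0, c0) :: T).Perm
       (((s0, c0) :: T).dropLast ++ pvCatMerge (((s0, c0) :: T).getLast (by simp)) [(first, (P.length : Int))])
  by_cases hl : first = (((s0, c0) :: T).getLast (by simp)).1
  · rw [if_pos hl]
    simp only [pvCatMerge]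
    rw [if_pos hl.symm]
    rw [hl, Int.add_comm]
    exact (List.perm_append_singleton _ _).symm
  · rw [if_neg hl]
    simp only [pvCatMerge]
    rw [if_neg (fun hh => hl hh.symm)]
    rw [show ((s0, c0) :: T).dropLast ++ ((s0, c0) :: T).getLast (by simp) :: [(first, (P.length : Int))]
          = ((s0, c0) :: T) ++ [(first, (P.length : Int))] from by
        conv_rhs => rw [← List.dropLast_append_getLast (l := (s0, c0) :: T) (by simp)]
        simp]
    exact (List.perm_append_singleton _ _).symm

-- ===== VERDICT (by name: the statement is the Claim_ definition above) =====
theorem pvTakeDrop {α : Type} (q : α → Bool) (l : List α) :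
    l.take (l.takeWhile q).length = l.takeWhile q ∧ l.drop (l.takeWhile q).length = l.dropWhile q := by
  set P := l.takeWhile q with hP
  set S := l.dropWhile q with hS
  have hPS : P ++ S = l := List.takeWhile_append_dropWhile
  constructor
  · conv_lhs => rw [← hPS]
    exact List.take_left' rfl
  · conv_lhs => rw [← hPS]
    exact List.drop_left' rfl

theorem pvHeadAdd_zero (l : List (String × Int)) : pvHeadAdd 0 l = l := by
  cases l with
  | nil => rfl
  | cons q t => obtain ⟨k, c⟩ := q; simp [pvHeadAdd]

theorem pvTakeWhile_all {α : Type} (q : α → Bool) (l : List α)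
    (h : (l.takeWhile q).length = l.length) : ∀ x ∈ l, q x := by
  induction l with
  | nil => simp
  | cons a t ih =>
    by_cases hqa : q a
    · rw [List.takeWhile_cons_of_pos hqa] at h
      simp only [List.length_cons, Nat.add_right_cancel_iff] at h
      intro x hx
      rcases List.mem_cons.mp hx with rfl | hx
      · exact hqa
      · exact ih h x hx
    · rw [List.takeWhile_cons_of_neg hqa] at h
      simp at h

theorem necklace_gaps_and_runs_spec : Claim_equal_necklace_gaps_and_runs := by
  intro bits _
  show necklace_gaps_and_runs bits = necklace_gaps_and_runs_alt bits
  cases bits with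
  | nil => rfl
  | cons first rest0 =>
    by_cases hcut :
        (((first :: rest0).takeWhile (fun b => b == first)).length = (first :: rest0).length)
    · -- the whole necklace is a single run
      have hall := pvTakeWhile_all (fun b => b == first) (first :: rest0) hcut
      have hrep : first :: rest0 = List.replicate (first :: rest0).length first := by
        rw [List.eq_replicate_iff]
        exact ⟨rfl, fun b hb => by simpa using hall b hb⟩
      have hGn : pvGroupby (first :: rest0) = [(first, ((first :: rest0).length : Int))] := by
        conv_lhs => rw [hrep]
        exact pvGroupby_replicate first _ (by simp)
      simp only [necklace_gaps_and_runs, necklace_gaps_and_runs_alt, hGn, if_pos hcut]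
      by_cases h0 : first = "0"
      · simp [pvWrapMerge, pvAdd, h0]
      · by_cases h1 : first = "1" <;> simp [pvWrapMerge, pvAdd, h0, h1]
    · -- rotate to a run boundary
      have htake := (pvTakeDrop (fun b => b == first) (first :: rest0)).1
      have hdrop := (pvTakeDrop (fun b => b == first) (first :: rest0)).2
      have hScons : (first :: rest0).dropWhile (fun b => b == first) ≠ [] := by
        intro hnil
        apply hcut
        have h2 := congrArg List.length
          (List.takeWhile_append_dropWhile (p := fun b => b == first) (l := first :: rest0))
        simpa [hnil] using h2
      obtain ⟨s0, S', hS'⟩ : ∃ s0 S',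
          (first :: rest0).dropWhile (fun b => b == first) = s0 :: S' := by
        cases hc : (first :: rest0).dropWhile (fun b => b == first) with
        | nil => exact absurd hc hScons
        | cons a l => exact ⟨a, l, rfl⟩
      have hGbEq : (first :: rest0).drop ((first :: rest0).takeWhile (fun b => b == first)).length
            ++ (first :: rest0).take ((first :: rest0).takeWhile (fun b => b == first)).length
          = s0 :: (S' ++ (first :: rest0).takeWhile (fun b => b == first)) := by
        rw [hdrop, htake, hS']; rfl
      have hperm := pvMain_perm (first :: rest0) first rest0 rfl hcut
      rw [hGbEq] at hperm
      have halt : necklace_gaps_and_runs_alt (first :: rest0)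
          = (PySem.List.sorted
              (pvSel "0" (pvGroupby (s0 :: (S' ++ (first :: rest0).takeWhile (fun b => b == first)))))
              (fun x => x) true,
             PySem.List.sorted
              (pvSel "1" (pvGroupby (s0 :: (S' ++ (first :: rest0).takeWhile (fun b => b == first)))))
              (fun x => x) true) := by
        simp only [necklace_gaps_and_runs_alt]
        rw [if_neg hcut, hGbEq]
        show (PySem.List.sorted
                (pvScan s0 1 ([], []) (S' ++ (first :: rest0).takeWhile (fun b => b == first))).1
                (fun x => x) true,
              PySem.List.sorted
                (pvScan s0 1 ([], []) (S' ++ (first :: rest0).takeWhile (fun b => b == first))).2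
                (fun x => x) true) = _
        rw [pvScan_eq (S' ++ (first :: rest0).takeWhile (fun b => b == first)) s0 1 ([], [])]
        rw [show ((1 : Int) - 1) = 0 from by ring, pvHeadAdd_zero, pvAdd_foldl]
        rfl
      rw [halt]
      show (PySem.List.sorted (pvSel "0" (pvWrapMerge (pvGroupby (first :: rest0)))) (fun x => x) true,
            PySem.List.sorted (pvSel "1" (pvWrapMerge (pvGroupby (first :: rest0)))) (fun x => x) true) = _
      exact Prod.ext
        (pvSorted_rev_of_perm _ _ ((hperm.filter _).map _))
        (pvSorted_rev_of_perm _ _ ((hperm.filter _).map _))
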